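-- pv_equiv track=rewrite | github.com/jcmullwh/usertest | packages/triage_engine/src/triage_engine/clustering.py | _exact_duplicate_pairs
-- ===== SOURCE A (Python) =====
-- from collections import defaultdict
-- from collections.abc import Callable, Iterable, Sequence
-- from itertools import combinations
--
-- def _exact_duplicate_pairs(fingerprints: Sequence[str]) -> set[tuple[int, int]]:
--     groups: dict[str, list[int]] = defaultdict(list)
--     for idx, fingerprint in enumerate(fingerprints):
--         if fingerprint:
--             groups[fingerprint].append(idx)
--
--     out: set[tuple[int, int]] = set()
--     for members in groups.values():
--         if len(members) > 1:
--             for left, right in combinations(sorted(members), 2):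
--                 out.add((left, right))
--     return out
-- ===== SOURCE B (Python) =====
-- def _exact_duplicate_pairs(fingerprints):
--     out = set()
--     handled = set()
--     for fp in fingerprints:
--         if fp and fp not in handled:
--             handled.add(fp)
--             group = [i for i, g in enumerate(fingerprints) if g == fp]
--             while group:
--                 left = group.pop(0)
--                 for right in group:
--                     out.add((left, right))
--     return out
-- ===== Notes on version B (the rewrite author's own statement) =====
-- stated objective: alternative
-- what changed: B drops the defaultdict grouping and itertools.combinations entirely: for each fingerprint at its first occurrence it scans the list once to collect that fingerprint's indices and emits the pairs directly with a pop-loop, so there is no dict, no combinations and no second pass over groups.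
import Mathlib
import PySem

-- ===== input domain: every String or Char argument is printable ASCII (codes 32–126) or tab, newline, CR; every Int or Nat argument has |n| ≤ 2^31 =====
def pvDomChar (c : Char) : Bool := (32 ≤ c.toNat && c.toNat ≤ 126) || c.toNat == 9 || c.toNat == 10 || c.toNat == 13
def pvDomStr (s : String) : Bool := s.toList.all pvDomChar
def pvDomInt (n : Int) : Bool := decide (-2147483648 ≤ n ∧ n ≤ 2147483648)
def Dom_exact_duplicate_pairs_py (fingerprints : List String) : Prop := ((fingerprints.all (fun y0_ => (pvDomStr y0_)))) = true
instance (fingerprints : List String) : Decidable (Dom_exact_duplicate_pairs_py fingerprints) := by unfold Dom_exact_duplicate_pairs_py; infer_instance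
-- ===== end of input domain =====

-- B replaces the dict-of-groups + itertools.combinations pipeline by a scan per first-occurrence
-- fingerprint with a pop-loop emitting the pairs directly (objective: alternative decomposition).

-- ===== PORT A =====
def exact_duplicate_pairs_py (fingerprints : List String) : List (Int × Int) :=
  let groups : PySem.Dict String (List Int) :=
    (PySem.List.enumerate fingerprints).foldl
      (fun d p => if p.2 ≠ "" then d.insert p.2 (d.getD p.2 [] ++ [p.1]) else d)
      PySem.Dict.empty
  (PySem.Dict.values groups).foldl
    (fun out members =>
      if 1 < members.length then
        (PySem.List.combinations (PySem.List.sorted members (fun x => x)) 2).foldl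
          (fun out c =>
            match c with
            | [left, right] => PySem.Set.add out (left, right)
            | _ => out)
          out
      else out)
    PySem.Set.empty

-- ===== PORT B =====
-- 'while group: left = group.pop(0); for right in group: out.add((left, right))'
def edpPairLoop (group : List Int) (out : PySem.Set (Int × Int)) : PySem.Set (Int × Int) :=
  match group with
  | [] => out
  | left :: rest => edpPairLoop rest (rest.foldl (fun o r => PySem.Set.add o (left, r)) out)

def exact_duplicate_pairs_py_alt (fingerprints : List String) : List (Int × Int) :=
  (fingerprints.foldl
    (fun (st : PySem.Set (Int × Int) × PySem.Set String) fp =>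
      if fp ≠ "" ∧ PySem.Set.contains st.2 fp = false then
        (edpPairLoop (((PySem.List.enumerate fingerprints).filter (fun q => q.2 == fp)).map (fun q => q.1)) st.1,
         PySem.Set.add st.2 fp)
      else st)
    (PySem.Set.empty, PySem.Set.empty)).1

-- ===== PRECONDITION & SPEC =====
def Spec_exact_duplicate_pairs_py (fingerprints : List String) (out : List (Int × Int)) : Prop := out = exact_duplicate_pairs_py_alt fingerprints
instance (fingerprints : List String) (out : List (Int × Int)) : Decidable (Spec_exact_duplicate_pairs_py fingerprints out) := by unfold Spec_exact_duplicate_pairs_py; infer_instance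

-- ===== CLAIM (what is proved, stated in full; the proofs are below) =====
def Claim_equal_exact_duplicate_pairs_py : Prop := ∀ (fingerprints : List String), Dom_exact_duplicate_pairs_py fingerprints → Spec_exact_duplicate_pairs_py fingerprints (exact_duplicate_pairs_py fingerprints)

-- ===== LEMMAS AND PROOFS =====

-- indices (from offset k) of the occurrences of f in l
def occFrom (l : List String) (k : Int) (f : String) : List Int :=
  ((PySem.List.enumerate l k).filter (fun q => q.2 == f)).map (fun q => q.1)

-- all (left, right) pairs of a list, left before right, in left-major order
def lexPairs : List Int → List (Int × Int)
  | [] => []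
  | x :: t => t.map (fun r => (x, r)) ++ lexPairs t

-- the distinct nonempty strings of l not yet in h, in first-occurrence order
def newFirsts : List String → List String → List String
  | [], _ => []
  | x :: t, h =>
      if x ≠ "" ∧ PySem.Set.contains h x = false then x :: newFirsts t (PySem.Set.add h x)
      else newFirsts t h

theorem occFrom_cons (x : String) (t : List String) (k : Int) (f : String) :
    occFrom (x :: t) k f = (if x == f then [k] else []) ++ occFrom t (k + 1) f := by
  by_cases h : x == f <;> simp [occFrom, PySem.List.enumerate, h]

theorem occFrom_lb (l : List String) (k : Int) (f : String) :
    ∀ j ∈ occFrom l k f, k ≤ j := by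
  induction l generalizing k with
  | nil => simp [occFrom, PySem.List.enumerate]
  | cons x t ih =>
    intro j hj
    rw [occFrom_cons] at hj
    rcases List.mem_append.1 hj with h | h
    · by_cases hx : x == f <;> simp [hx] at h; omega
    · have := ih (k + 1) j h; omega

theorem occFrom_pairwise (l : List String) (k : Int) (f : String) :
    (occFrom l k f).Pairwise (· < ·) := by
  induction l generalizing k with
  | nil => simp [occFrom, PySem.List.enumerate]
  | cons x t ih =>
    rw [occFrom_cons]
    by_cases hx : x == f
    · simp only [hx, if_pos]
      refine List.pairwise_cons.2 ⟨fun j hj => ?_, ih (k + 1)⟩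
      have := occFrom_lb t (k + 1) f j hj; omega
    · simpa [hx] using ih (k + 1)

theorem newFirsts_ne_empty (l : List String) (h : List String) :
    ∀ f ∈ newFirsts l h, f ≠ "" := by
  induction l generalizing h with
  | nil => simp [newFirsts]
  | cons x t ih =>
    intro f hf
    unfold newFirsts at hf
    split at hf
    · rcases List.mem_cons.1 hf with rfl | hf
      · exact (by assumption : f ≠ "" ∧ _).1
      · exact ih _ f hf
    · exact ih _ f hf

theorem newFirsts_not_mem (l : List String) (h : List String) :
    ∀ f ∈ newFirsts l h, PySem.Set.contains h f = false := by
  induction l generalizing h with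
  | nil => simp [newFirsts]
  | cons y s ih =>
    intro f hf
    unfold newFirsts at hf
    split at hf
    · rename_i hcond
      rcases List.mem_cons.1 hf with rfl | hf
      · exact hcond.2
      · have hadd := ih (PySem.Set.add h y) f hf
        simp only [PySem.Set.add] at hadd
        split at hadd
        · exact hadd
        · have hap : List.contains (h ++ [y]) f = false := hadd
          rw [List.contains_append] at hap
          exact (Bool.or_eq_false_iff.mp hap).1
    · exact ih h f hf

theorem edpPairLoop_eq (g : List Int) (out : PySem.Set (Int × Int)) :
    edpPairLoop g out = (lexPairs g).foldl PySem.Set.add out := by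
  induction g generalizing out with
  | nil => rfl
  | cons x t ih =>
    rw [edpPairLoop, ih, lexPairs, List.foldl_append, List.foldl_map]

theorem comb2_fold (g : List Int) (out : PySem.Set (Int × Int)) :
    (PySem.List.combinations g 2).foldl
        (fun out c =>
          match c with
          | [left, right] => PySem.Set.add out (left, right)
          | _ => out) out
      = (lexPairs g).foldl PySem.Set.add out := by
  induction g generalizing out with
  | nil => rfl
  | cons x t ih =>
    have h2 : (2 : Nat) = 1 + 1 := rfl
    rw [h2, PySem.List.combinations_cons_succ, PySem.List.combinations_one, ← h2,
      List.foldl_append, lexPairs, List.foldl_append, ih]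
    congr 1
    rw [List.foldl_map, List.foldl_map, List.foldl_map]

theorem sorted_of_pairwise (g : List Int) (h : g.Pairwise (· < ·)) :
    PySem.List.sorted g (fun x => x) = g :=
  PySem.List.sorted_eq_of_perm_of_pairwise_lt g g (fun x => x) (List.Perm.refl g) h

theorem group_step (members : List Int) (out : PySem.Set (Int × Int))
    (h : members.Pairwise (· < ·)) :
    (if 1 < members.length then
        (PySem.List.combinations (PySem.List.sorted members (fun x => x)) 2).foldl
          (fun out c =>
            match c with
            | [left, right] => PySem.Set.add out (left, right)
            | _ => out) out
      else out)
      = (lexPairs members).foldl PySem.Set.add out := by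
  by_cases hl : 1 < members.length
  · rw [if_pos hl, sorted_of_pairwise members h, comb2_fold]
  · rw [if_neg hl]
    match members, hl with
    | [], _ => rfl
    | [m], _ => rfl
    | a :: b :: t, hl => exact absurd (by simp) hl

theorem groups_fold (gs : List (List Int)) (out : PySem.Set (Int × Int))
    (h : ∀ g ∈ gs, g.Pairwise (· < ·)) :
    gs.foldl
        (fun out members =>
          if 1 < members.length then
            (PySem.List.combinations (PySem.List.sorted members (fun x => x)) 2).foldl
              (fun out c =>
                match c with
                | [left, right] => PySem.Set.add out (left, right)
                | _ => out) out
          else out) out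
      = ((gs.map lexPairs).flatten).foldl PySem.Set.add out := by
  induction gs generalizing out with
  | nil => rfl
  | cons g t ih =>
    rw [List.foldl_cons, List.map_cons, List.flatten_cons, List.foldl_append,
      group_step g out (h g (List.mem_cons_self)), ih _ (fun g hg => h g (List.mem_cons_of_mem _ hg))]

theorem find?_of_nodup {x : String} {p : String × List Int} {items : List (String × List Int)}
    (hnd : (items.map Prod.fst).Nodup) (hp : p ∈ items) (hx : p.1 = x) :
    items.find? (fun q => q.1 == x) = some p := by
  induction items with
  | nil => cases hp
  | cons q t ih =>
    rcases List.mem_cons.1 hp with rfl | hp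
    · simp [hx]
    · have hq : (q.1 == x) = false := by
        simp only [List.map_cons, List.nodup_cons] at hnd
        have : p.1 ∈ t.map Prod.fst := List.mem_map_of_mem hp
        rw [hx] at this
        simp only [beq_eq_false_iff_ne, ne_eq]
        intro he; exact hnd.1 (he ▸ this)
      rw [List.find?_cons, hq]
      exact ih (by simp only [List.map_cons, List.nodup_cons] at hnd; exact hnd.2) hp

theorem dict_contains_eq (d : PySem.Dict String (List Int)) (x : String) :
    d.contains x = PySem.Set.contains (d.items.map Prod.fst) x := by
  simp only [PySem.Dict.contains, PySem.Set.contains]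
  apply Bool.eq_iff_iff.mpr
  simp only [List.any_eq_true, List.contains_iff_mem, List.mem_map, beq_iff_eq]

theorem A_inv (l : List String) (k : Int) (d : PySem.Dict String (List Int))
    (hne : ∀ p ∈ d.items, p.1 ≠ "") (hnd : (d.items.map Prod.fst).Nodup) :
    ((PySem.List.enumerate l k).foldl
        (fun d p => if p.2 ≠ "" then d.insert p.2 (d.getD p.2 [] ++ [p.1]) else d) d).items
      = d.items.map (fun p => (p.1, p.2 ++ occFrom l k p.1))
        ++ (newFirsts l (d.items.map Prod.fst)).map (fun f => (f, occFrom l k f)) := by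
  induction l generalizing k d with
  | nil =>
    simp only [PySem.List.enumerate, List.foldl_nil, newFirsts, List.map_nil, List.append_nil]
    conv_lhs => rw [← List.map_id d.items]
    apply List.map_congr_left
    intro p _
    simp [occFrom, PySem.List.enumerate]
  | cons x t ih =>
    have hen : PySem.List.enumerate (x :: t) k = (k, x) :: PySem.List.enumerate t (k + 1) := rfl
    rw [hen, List.foldl_cons]
    by_cases hx : x = ""
    · subst hx
      simp only [ne_eq, not_true_eq_false, if_false]
      rw [ih (k + 1) d hne hnd]
      have hnf : newFirsts ("" :: t) (d.items.map Prod.fst) = newFirsts t (d.items.map Prod.fst) := by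
        simp [newFirsts]
      rw [hnf]
      congr 1
      · apply List.map_congr_left
        intro p hp
        have : (("" : String) == p.1) = false := by
          simp only [beq_eq_false_iff_ne]; exact fun he => hne p hp he.symm
        rw [occFrom_cons, this]; simp
      · apply List.map_congr_left
        intro f hf
        have : (("" : String) == f) = false := by
          simp only [beq_eq_false_iff_ne]
          exact fun he => newFirsts_ne_empty t _ f hf he.symm
        rw [occFrom_cons, this]; simp
    · simp only [ne_eq, hx, not_false_eq_true, if_true]
      by_cases hc : d.contains x = true
      · -- x is already a key: insert replaces its value in place
        have hitems : (d.insert x (d.getD x [] ++ [k])).items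
            = d.items.map (fun p => if p.1 == x then (x, d.getD x [] ++ [k]) else p) := by
          simp [PySem.Dict.insert, hc]
        have hkeys : ((d.insert x (d.getD x [] ++ [k])).items.map Prod.fst) = d.items.map Prod.fst := by
          rw [hitems, List.map_map]
          apply List.map_congr_left
          intro p _
          by_cases h : p.1 == x
          · simp [Function.comp, (beq_iff_eq.1 h).symm]
          · simp [Function.comp, h]
        have hne' : ∀ p ∈ (d.insert x (d.getD x [] ++ [k])).items, p.1 ≠ "" := by
          rw [hitems]
          intro p hp
          rcases List.mem_map.1 hp with ⟨q, hq, rfl⟩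
          by_cases h : q.1 == x <;> simp [h, hx, hne q hq]
        rw [ih (k + 1) _ hne' (hkeys ▸ hnd), hkeys, hitems, List.map_map]
        have hnfc : newFirsts (x :: t) (d.items.map Prod.fst) = newFirsts t (d.items.map Prod.fst) := by
          have hset : PySem.Set.contains (d.items.map Prod.fst) x = true := (dict_contains_eq d x) ▸ hc
          rw [newFirsts, if_neg]
          rintro ⟨-, h2⟩
          rw [hset] at h2
          simp at h2
        rw [hnfc]
        congr 1
        · apply List.map_congr_left
          intro p hp
          by_cases h : p.1 == x
          · have hpx : p.1 = x := beq_iff_eq.1 h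
            have hfind : d.items.find? (fun q => q.1 == x) = some p := find?_of_nodup hnd hp hpx
            have hget : d.getD x [] = p.2 := by
              simp [PySem.Dict.getD, PySem.Dict.get?, hfind]
            simp only [Function.comp_def, h, if_pos]
            rw [hget, occFrom_cons, hpx]
            simp
          · have hpx : (x == p.1) = false := by
              simp only [beq_eq_false_iff_ne]
              intro he; exact h (by simp [he])
            simp only [Function.comp_def, h, if_neg, Bool.false_eq_true, not_false_eq_true]
            rw [occFrom_cons, hpx]; simp
        · apply List.map_congr_left
          intro f hf
          have hfx : (x == f) = false := by
            simp only [beq_eq_false_iff_ne]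
            rintro rfl
            have hset : PySem.Set.contains (d.items.map Prod.fst) x = true := (dict_contains_eq d x) ▸ hc
            have hnm := newFirsts_not_mem t (d.items.map Prod.fst) x hf
            rw [hnm] at hset
            exact absurd hset (by simp)
          rw [occFrom_cons, hfx]; simp
      · -- x is a new key: insert appends (x, [k])
        have hget : d.getD x [] = [] := by
          have : d.items.find? (fun q => q.1 == x) = none := by
            rw [List.find?_eq_none]
            intro p hp hpx
            exact hc (List.any_eq_true.2 ⟨p, hp, hpx⟩)
          simp [PySem.Dict.getD, PySem.Dict.get?, this]
        have hitems : (d.insert x (d.getD x [] ++ [k])).items = d.items ++ [(x, [k])] := by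
          simp [PySem.Dict.insert, hc, hget]
        have hkeys : ((d.insert x (d.getD x [] ++ [k])).items.map Prod.fst)
            = d.items.map Prod.fst ++ [x] := by rw [hitems]; simp
        have hxmem : x ∉ d.items.map Prod.fst := by
          intro hm
          rcases List.mem_map.1 hm with ⟨p, hp, hpx⟩
          exact hc (List.any_eq_true.2 ⟨p, hp, by simp [hpx]⟩)
        have hne' : ∀ p ∈ (d.insert x (d.getD x [] ++ [k])).items, p.1 ≠ "" := by
          rw [hitems]
          intro p hp
          rcases List.mem_append.1 hp with hp | hp
          · exact hne p hp
          · simp at hp; subst hp; exact hx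
        have hnd' : ((d.insert x (d.getD x [] ++ [k])).items.map Prod.fst).Nodup := by
          rw [hkeys]
          exact List.Nodup.append hnd (List.nodup_singleton x) (by
            intro a ha hb; simp at hb; subst hb; exact hxmem ha)
        rw [ih (k + 1) _ hne' hnd', hkeys, hitems]
        have hcset : PySem.Set.contains (d.items.map Prod.fst) x = false := by
          rw [← dict_contains_eq]
          cases hcc : d.contains x with
          | false => rfl
          | true => exact absurd hcc hc
        have hadd : PySem.Set.add (d.items.map Prod.fst) x = d.items.map Prod.fst ++ [x] := by
          have hne2 : ¬ (PySem.Set.contains (d.items.map Prod.fst) x = true) := by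
            rw [hcset]; simp
          simp only [PySem.Set.add, if_neg hne2]
        have hnf : newFirsts (x :: t) (d.items.map Prod.fst)
            = x :: newFirsts t (d.items.map Prod.fst ++ [x]) := by
          rw [newFirsts, if_pos ⟨hx, hcset⟩, hadd]
        rw [hnf]
        simp only [List.map_append, List.map_cons, List.map_nil]
        rw [List.append_assoc]
        congr 1
        · apply List.map_congr_left
          intro p hp
          have hpx : (x == p.1) = false := by
            simp only [beq_eq_false_iff_ne]
            intro he
            exact hxmem (he ▸ List.mem_map_of_mem hp)
          rw [occFrom_cons, hpx]; simp
        · have hocc : occFrom (x :: t) k x = k :: occFrom t (k + 1) x := by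
            rw [occFrom_cons]; simp
          simp only [List.cons_append, List.nil_append, hocc]
          congr 1
          apply List.map_congr_left
          intro f hf
          have hfx : (x == f) = false := by
            simp only [beq_eq_false_iff_ne]
            rintro rfl
            have hnm := newFirsts_not_mem t (d.items.map Prod.fst ++ [x]) x hf
            simp [PySem.Set.contains] at hnm
          rw [occFrom_cons, hfx]; simp

-- B's loop invariant
theorem B_inv (fps : List String) (l : List String) (out : PySem.Set (Int × Int)) (h : List String) :
    (l.foldl
        (fun (st : PySem.Set (Int × Int) × PySem.Set String) fp =>
          if fp ≠ "" ∧ PySem.Set.contains st.2 fp = false then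
            (edpPairLoop (((PySem.List.enumerate fps).filter (fun q => q.2 == fp)).map (fun q => q.1)) st.1,
             PySem.Set.add st.2 fp)
          else st)
        (out, h)).1
      = (((newFirsts l h).map (fun f => lexPairs (occFrom fps 0 f))).flatten).foldl PySem.Set.add out := by
  induction l generalizing out h with
  | nil => rfl
  | cons x t ih =>
    rw [List.foldl_cons]
    by_cases hc : x ≠ "" ∧ PySem.Set.contains h x = false
    · rw [if_pos hc]
      rw [ih]
      have : (((PySem.List.enumerate fps).filter (fun q => q.2 == x)).map (fun q => q.1)) = occFrom fps 0 x := rfl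
      rw [this, edpPairLoop_eq]
      rw [newFirsts, if_pos hc]
      rw [List.map_cons, List.flatten_cons, List.foldl_append]
    · rw [if_neg hc, ih, newFirsts, if_neg hc]

-- ===== VERDICT (by name: the statement is the Claim_ definition above) =====
theorem exact_duplicate_pairs_py_spec : Claim_equal_exact_duplicate_pairs_py := by
  intro fps _
  unfold Spec_exact_duplicate_pairs_py
  simp only [exact_duplicate_pairs_py, exact_duplicate_pairs_py_alt]
  rw [B_inv fps fps PySem.Set.empty PySem.Set.empty]
  have hA := A_inv fps 0 PySem.Dict.empty (by simp [PySem.Dict.empty]) (by simp [PySem.Dict.empty])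
  have hkeys0 : (PySem.Dict.empty : PySem.Dict String (List Int)).items.map Prod.fst = [] := rfl
  have hitems0 : (PySem.Dict.empty : PySem.Dict String (List Int)).items = [] := rfl
  rw [hkeys0, hitems0] at hA
  simp only [List.map_nil, List.nil_append] at hA
  simp only [PySem.Dict.values, hA, List.map_map]
  rw [groups_fold _ _ (by
    intro g hg
    rcases List.mem_map.1 hg with ⟨f, _, rfl⟩
    simp only [Function.comp_def]
    exact occFrom_pairwise fps 0 f)]
  rw [List.map_map]
  simp only [Function.comp_def]
  rfl
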